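-- pv_equiv track=rewrite | github.com/chandrakanthm/skyvern | skyvern/webeye/audit/visual_analyzer.py | _categorize_visual_properties
-- ===== SOURCE A (Python) =====
-- from typing import Dict, List, Optional, Tuple, Any
--
-- def _categorize_visual_properties(styles: Dict[str, str]) -> Dict[str, Dict[str, str]]:
--     categories = {
--         'colors': {},
--         'typography': {},
--         'spacing': {},
--         'layout': {}
--     }
--
--     color_props = ['color', 'background-color', 'border-color']
--     for prop in color_props:
--         if prop in styles:
--             categories['colors'][prop] = styles[prop]
--
--     typography_props = ['font-family', 'font-size', 'font-weight', 'line-height', 'letter-spacing', 'text-align']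
--     for prop in typography_props:
--         if prop in styles:
--             categories['typography'][prop] = styles[prop]
--
--     spacing_props = ['margin', 'margin-top', 'margin-right', 'margin-bottom', 'margin-left',
--                     'padding', 'padding-top', 'padding-right', 'padding-bottom', 'padding-left']
--     for prop in spacing_props:
--         if prop in styles:
--             categories['spacing'][prop] = styles[prop]
--
--     layout_props = ['border-width', 'border-radius', 'box-shadow', '_width', '_height']
--     for prop in layout_props:
--         if prop in styles:
--             categories['layout'][prop] = styles[prop]
--
--     return categories
-- ===== SOURCE B (Python) =====
-- _PROP_INFO = {
--     'color': ('colors', 0),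
--     'background-color': ('colors', 1),
--     'border-color': ('colors', 2),
--     'font-family': ('typography', 3),
--     'font-size': ('typography', 4),
--     'font-weight': ('typography', 5),
--     'line-height': ('typography', 6),
--     'letter-spacing': ('typography', 7),
--     'text-align': ('typography', 8),
--     'margin': ('spacing', 9),
--     'margin-top': ('spacing', 10),
--     'margin-right': ('spacing', 11),
--     'margin-bottom': ('spacing', 12),
--     'margin-left': ('spacing', 13),
--     'padding': ('spacing', 14),
--     'padding-top': ('spacing', 15),
--     'padding-right': ('spacing', 16),
--     'padding-bottom': ('spacing', 17),
--     'padding-left': ('spacing', 18),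
--     'border-width': ('layout', 19),
--     'border-radius': ('layout', 20),
--     'box-shadow': ('layout', 21),
--     '_width': ('layout', 22),
--     '_height': ('layout', 23),
-- }
--
--
-- def _categorize_visual_properties(styles):
--     categories = {'colors': {}, 'typography': {}, 'spacing': {}, 'layout': {}}
--     for prop in sorted((p for p in styles if p in _PROP_INFO),
--                        key=lambda p: _PROP_INFO[p][1]):
--         categories[_PROP_INFO[prop][0]][prop] = styles[prop]
--     return categories
-- ===== Notes on version B (the rewrite author's own statement) =====
-- stated objective: alternative
-- what changed: Instead of four passes over fixed per-category property lists testing membership in styles, B makes one pass over the input's keys, filters/buckets them through a static prop->(category,rank) table, and sorts by the global rank to restore the canonical order.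
import Mathlib
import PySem

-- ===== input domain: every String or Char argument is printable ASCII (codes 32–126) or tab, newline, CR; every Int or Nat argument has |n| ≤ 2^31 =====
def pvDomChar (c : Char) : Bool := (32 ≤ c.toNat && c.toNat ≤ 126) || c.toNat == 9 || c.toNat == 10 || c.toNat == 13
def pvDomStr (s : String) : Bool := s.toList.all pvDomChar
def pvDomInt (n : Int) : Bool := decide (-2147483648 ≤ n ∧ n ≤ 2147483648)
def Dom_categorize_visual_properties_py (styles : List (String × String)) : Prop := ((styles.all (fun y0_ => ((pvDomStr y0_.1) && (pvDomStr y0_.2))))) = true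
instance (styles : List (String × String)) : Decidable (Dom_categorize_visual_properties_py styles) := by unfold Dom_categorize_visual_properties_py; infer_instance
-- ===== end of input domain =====

-- B replaces A's four membership-testing passes over fixed property lists by one pass over the
-- input's keys, filtered and bucketed through a static prop→(category,rank) table after a rank
-- sort (objective: alternative).


-- ===== PORT A =====
-- one category-filling loop of A: 'for prop in props: if prop in styles: categories[cat][prop] = styles[prop]'
def pyCatLoop (st : PySem.Dict String String) (cat : String) (props : List String)
    (cats : PySem.Dict String (PySem.Dict String String)) :
    PySem.Dict String (PySem.Dict String String) :=
  props.foldl (fun cats prop =>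
    match st.get? prop with
    | some v => cats.modify cat PySem.Dict.empty (fun inner => inner.insert prop v)
    | none => cats) cats

def categorize_visual_properties_py (styles : List (String × String)) :
    List (String × List (String × String)) :=
  let st : PySem.Dict String String := PySem.Dict.ofList styles
  let categories : PySem.Dict String (PySem.Dict String String) :=
    PySem.Dict.ofList [("colors", PySem.Dict.empty), ("typography", PySem.Dict.empty),
                       ("spacing", PySem.Dict.empty), ("layout", PySem.Dict.empty)]
  let color_props := ["color", "background-color", "border-color"]
  let categories := pyCatLoop st "colors" color_props categories
  let typography_props := ["font-family", "font-size", "font-weight", "line-height",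
                           "letter-spacing", "text-align"]
  let categories := pyCatLoop st "typography" typography_props categories
  let spacing_props := ["margin", "margin-top", "margin-right", "margin-bottom", "margin-left",
                        "padding", "padding-top", "padding-right", "padding-bottom", "padding-left"]
  let categories := pyCatLoop st "spacing" spacing_props categories
  let layout_props := ["border-width", "border-radius", "box-shadow", "_width", "_height"]
  let categories := pyCatLoop st "layout" layout_props categories
  categories.items.map (fun kv => (kv.1, kv.2.items))

-- ===== PORT B =====
-- the static table _PROP_INFO of Source B: property → (category, global rank)
def altPropInfo : PySem.Dict String (String × Int) :=
  PySem.Dict.ofList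
    [("color", ("colors", 0)), ("background-color", ("colors", 1)), ("border-color", ("colors", 2)),
     ("font-family", ("typography", 3)), ("font-size", ("typography", 4)),
     ("font-weight", ("typography", 5)), ("line-height", ("typography", 6)),
     ("letter-spacing", ("typography", 7)), ("text-align", ("typography", 8)),
     ("margin", ("spacing", 9)), ("margin-top", ("spacing", 10)), ("margin-right", ("spacing", 11)),
     ("margin-bottom", ("spacing", 12)), ("margin-left", ("spacing", 13)),
     ("padding", ("spacing", 14)), ("padding-top", ("spacing", 15)),
     ("padding-right", ("spacing", 16)), ("padding-bottom", ("spacing", 17)),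
     ("padding-left", ("spacing", 18)),
     ("border-width", ("layout", 19)), ("border-radius", ("layout", 20)),
     ("box-shadow", ("layout", 21)), ("_width", ("layout", 22)), ("_height", ("layout", 23))]

-- the loop body: categories[_PROP_INFO[prop][0]][prop] = styles[prop]
-- (both lookups always succeed for a recognized key of styles; the fall-through arm is a totality guard)
def altStep (st : PySem.Dict String String)
    (cats : PySem.Dict String (PySem.Dict String String)) (prop : String) :
    PySem.Dict String (PySem.Dict String String) :=
  match altPropInfo.get? prop, st.get? prop with
  | some ci, some v => cats.modify ci.1 PySem.Dict.empty (fun inner => inner.insert prop v)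
  | _, _ => cats

def categorize_visual_properties_py_alt (styles : List (String × String)) :
    List (String × List (String × String)) :=
  let st : PySem.Dict String String := PySem.Dict.ofList styles
  let categories : PySem.Dict String (PySem.Dict String String) :=
    PySem.Dict.ofList [("colors", PySem.Dict.empty), ("typography", PySem.Dict.empty),
                       ("spacing", PySem.Dict.empty), ("layout", PySem.Dict.empty)]
  let ordered := PySem.List.sorted (st.keys.filter (fun p => altPropInfo.contains p))
                   (fun p => (altPropInfo.getD p ("", 0)).2)
  let categories := ordered.foldl (altStep st) categories
  categories.items.map (fun kv => (kv.1, kv.2.items))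

-- ===== PRECONDITION & SPEC =====
def Spec_categorize_visual_properties_py (styles : List (String × String)) (out : List (String × List (String × String))) : Prop := out = categorize_visual_properties_py_alt styles
instance (styles : List (String × String)) (out : List (String × List (String × String))) : Decidable (Spec_categorize_visual_properties_py styles out) := by unfold Spec_categorize_visual_properties_py; infer_instance

-- ===== CLAIM (what is proved, stated in full; the proofs are below) =====
def Claim_equal_categorize_visual_properties_py : Prop := ∀ (styles : List (String × String)), Dom_categorize_visual_properties_py styles → Spec_categorize_visual_properties_py styles (categorize_visual_properties_py styles)

-- ===== LEMMAS AND PROOFS =====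

-- the 24 recognized properties, in table (= A's) order
def allProps : List String :=
  ["color", "background-color", "border-color",
   "font-family", "font-size", "font-weight", "line-height", "letter-spacing", "text-align",
   "margin", "margin-top", "margin-right", "margin-bottom", "margin-left",
   "padding", "padding-top", "padding-right", "padding-bottom", "padding-left",
   "border-width", "border-radius", "box-shadow", "_width", "_height"]

-- B's sorted, filtered key list IS the canonical list filtered to the present keys
lemma ordered_eq (st : PySem.Dict String String) (hnd : st.keys.Nodup) :
    PySem.List.sorted (st.keys.filter (fun p => altPropInfo.contains p))
      (fun p => (altPropInfo.getD p ("", 0)).2)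
    = allProps.filter (fun p => st.contains p) := by
  apply PySem.List.sorted_eq_of_perm_of_pairwise_lt
  · rw [List.perm_ext_iff_of_nodup (List.Nodup.filter _ (by decide))
      (List.Nodup.filter _ hnd)]
    intro p
    have hk : altPropInfo.keys = allProps := by decide
    simp only [List.mem_filter, PySem.Dict.contains_iff_mem_keys, hk]
    exact and_comm
  · exact List.Pairwise.filter _ (by decide)

-- folding B's step over one category's (filtered) segment is A's loop for that category
lemma seg_eq (st : PySem.Dict String String) (cat : String) (props : List String)
    (hcat : ∀ p ∈ props, (altPropInfo.get? p).map Prod.fst = some cat)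
    (X : PySem.Dict String (PySem.Dict String String)) :
    (props.filter (fun p => st.contains p)).foldl (altStep st) X = pyCatLoop st cat props X := by
  rw [← PySem.List.foldl_if_eq_foldl_filter]
  unfold pyCatLoop
  apply PySem.List.foldl_congr_mem
  intro acc p hp
  have h1 := hcat p hp
  cases hinfo : altPropInfo.get? p with
  | none => simp [hinfo] at h1
  | some ci =>
    rw [hinfo] at h1
    have hci : ci.1 = cat := by simpa using h1
    cases hget : st.get? p with
    | none =>
      have : st.contains p = false := by
        rw [PySem.Dict.contains_eq_isSome_get?, hget]; rfl
      simp [this]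
    | some v =>
      have : st.contains p = true := by
        rw [PySem.Dict.contains_eq_isSome_get?, hget]; rfl
      simp [altStep, this, hinfo, hget, hci]

-- ===== VERDICT (by name: the statement is the Claim_ definition above) =====
theorem categorize_visual_properties_py_spec : Claim_equal_categorize_visual_properties_py := by
  intro styles _
  show categorize_visual_properties_py styles = categorize_visual_properties_py_alt styles
  unfold categorize_visual_properties_py categorize_visual_properties_py_alt
  dsimp only
  rw [ordered_eq (PySem.Dict.ofList styles) (PySem.Dict.nodup_keys_ofList styles)]
  have hsplit : allProps
      = ["color", "background-color", "border-color"]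
        ++ (["font-family", "font-size", "font-weight", "line-height",
             "letter-spacing", "text-align"]
        ++ (["margin", "margin-top", "margin-right", "margin-bottom", "margin-left",
             "padding", "padding-top", "padding-right", "padding-bottom", "padding-left"]
        ++ ["border-width", "border-radius", "box-shadow", "_width", "_height"])) := by rfl
  rw [hsplit, List.filter_append, List.filter_append, List.filter_append,
    List.foldl_append, List.foldl_append, List.foldl_append,
    seg_eq _ "colors" ["color", "background-color", "border-color"] (by decide),
    seg_eq _ "typography" ["font-family", "font-size", "font-weight", "line-height",
      "letter-spacing", "text-align"] (by decide),
    seg_eq _ "spacing" ["margin", "margin-top", "margin-right", "margin-bottom", "margin-left",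
      "padding", "padding-top", "padding-right", "padding-bottom", "padding-left"] (by decide),
    seg_eq _ "layout" ["border-width", "border-radius", "box-shadow", "_width", "_height"]
      (by decide)]
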